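-- pv_equiv track=rewrite | github.com/s0xphie/0x | supersingularity/eisenstein.py | expand_program_phase
-- ===== SOURCE A (Python) =====
-- def expand_program_phase(phase_text: str, phase_span: int = 6) -> list[int]:
--     motifs = ["".join(ch for ch in motif if ch.isdigit()) for motif in phase_text.split(",")]
--     motifs = [motif for motif in motifs if motif]
--     if not motifs:
--         return []
--
--     values: list[int] = []
--     motif_index = 0
--     while len(values) < phase_span:
--         motif = motifs[motif_index % len(motifs)]
--         for char in motif:
--             values.append(int(char))
--             if len(values) >= phase_span:
--                 break
--         motif_index += 1
--     return values
-- ===== SOURCE B (Python) =====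
-- def expand_program_phase(phase_text: str, phase_span: int = 6) -> list[int]:
--     motifs = ["".join(ch for ch in motif if ch.isdigit()) for motif in phase_text.split(",")]
--     motifs = [motif for motif in motifs if motif]
--     if not motifs:
--         return []
--     combined = "".join(motifs)
--     n = len(combined)
--     return [int(combined[i % n]) for i in range(phase_span)]
-- ===== Notes on version B (the rewrite author's own statement) =====
-- stated objective: simpler
-- what changed: Replaces the nested cyclic while/for loop with break and motif_index counter by concatenating the parsed motifs once and reading the first phase_span digits of the repeated concatenation by modular indexing in a single comprehension.
import Mathlib
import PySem

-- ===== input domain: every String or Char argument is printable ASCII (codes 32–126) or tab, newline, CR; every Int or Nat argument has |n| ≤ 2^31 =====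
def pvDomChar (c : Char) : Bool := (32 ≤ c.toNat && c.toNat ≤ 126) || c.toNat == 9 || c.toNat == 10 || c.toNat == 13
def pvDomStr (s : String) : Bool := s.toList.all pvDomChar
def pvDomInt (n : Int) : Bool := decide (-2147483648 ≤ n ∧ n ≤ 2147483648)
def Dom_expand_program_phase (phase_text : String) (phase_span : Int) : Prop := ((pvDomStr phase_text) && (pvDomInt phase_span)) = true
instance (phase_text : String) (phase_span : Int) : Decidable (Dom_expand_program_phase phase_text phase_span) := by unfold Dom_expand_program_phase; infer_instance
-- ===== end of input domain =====

-- B replaces A's nested cyclic while/for loop (with break and motif_index counter) by one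
-- concatenation of the parsed motifs plus modular indexing over range(phase_span); objective: simpler.


-- ===== PORT A =====
-- int(char) for a single digit character (both Pythons only apply it to chars passing isdigit)
def pvDigit (c : Char) : Int := (c.toNat : Int) - 48

-- the two identical parsing lines of A and B:
-- motifs = ["".join(ch for ch in motif if ch.isdigit()) for motif in phase_text.split(",")]
-- motifs = [motif for motif in motifs if motif]
def pvMotifs (phase_text : String) : List (List Char) :=
  (((PySem.Chars.splitOn phase_text.toList [',']).map
      (fun motif => motif.filter PySem.Chars.isdigit)).filter (fun m => !m.isEmpty))

-- inner 'for char in motif: values.append(int(char)); if len(values) >= phase_span: break'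
def pvInnerA (chars : List Char) (span : Int) (values : List Int) : List Int :=
  match chars with
  | [] => values
  | c :: cs =>
    let v := values ++ [pvDigit c]
    if span ≤ (v.length : Int) then v else pvInnerA cs span v

-- outer 'while len(values) < phase_span' loop; the inner guard 'values.length < v.length' only
-- makes the recursion total (it always holds here: every motif reaching the loop is non-empty)
def pvLoopA (motifs : List (List Char)) (span : Int) (values : List Int) (motifIndex : Nat) :
    List Int :=
  if h : (values.length : Int) < span then
    -- motif := motifs[motif_index % len(motifs)]; v := values after the inner for-loop
    if h2 : values.length < (pvInnerA (motifs.getD (motifIndex % motifs.length) []) span values).length then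
      pvLoopA motifs span (pvInnerA (motifs.getD (motifIndex % motifs.length) []) span values) (motifIndex + 1)
    else pvInnerA (motifs.getD (motifIndex % motifs.length) []) span values
  else values
  termination_by (span - values.length).toNat
  decreasing_by omega

def expand_program_phase (phase_text : String) (phase_span : Int) : List Int :=
  let motifs := pvMotifs phase_text
  if motifs.isEmpty then [] else pvLoopA motifs phase_span [] 0

-- ===== PORT B =====
def expand_program_phase_alt (phase_text : String) (phase_span : Int) : List Int :=
  let motifs := pvMotifs phase_text
  if motifs.isEmpty then []
  else
    let combined := PySem.Chars.join [] motifs          -- combined = "".join(motifs)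
    (PySem.List.pyRange 0 phase_span 1).map             -- [int(combined[i % n]) for i in range(phase_span)]
      (fun i => pvDigit (PySem.List.pyGetD combined (PySem.Int.mod i (combined.length : Int)) ' '))

-- ===== PRECONDITION & SPEC =====
def Spec_expand_program_phase (phase_text : String) (phase_span : Int) (out : List Int) : Prop := out = expand_program_phase_alt phase_text phase_span
instance (phase_text : String) (phase_span : Int) (out : List Int) : Decidable (Spec_expand_program_phase phase_text phase_span out) := by unfold Spec_expand_program_phase; infer_instance

-- ===== CLAIM (what is proved, stated in full; the proofs are below) =====
def Claim_equal_expand_program_phase : Prop := ∀ (phase_text : String) (phase_span : Int), Dom_expand_program_phase phase_text phase_span → Spec_expand_program_phase phase_text phase_span (expand_program_phase phase_text phase_span)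

-- ===== LEMMAS AND PROOFS =====

-- the digit at position j of the infinite repetition of cs
def streamD (cs : List Char) (j : Nat) : Int := pvDigit (cs.getD (j % cs.length) ' ')
-- the first n digits of that repetition
def cycTake (cs : List Char) (n : Nat) : List Int := (List.range n).map (streamD cs)

-- total length of the first i motifs taken cyclically
def cycP (motifs : List (List Char)) (i : Nat) : Nat :=
  ((List.range i).map (fun t => (motifs.getD (t % motifs.length) []).length)).sum
-- total length of the first r motifs
def sumS (motifs : List (List Char)) (r : Nat) : Nat :=
  ((motifs.take r).map List.length).sum

theorem length_cycTake (cs : List Char) (n : Nat) : (cycTake cs n).length = n := by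
  simp [cycTake]

theorem getElem_cycTake (cs : List Char) (n idx : Nat) (h : idx < n) :
    (cycTake cs n)[idx]'(by simp [cycTake]; omega) = streamD cs idx := by
  simp [cycTake]

theorem cycP_succ (motifs : List (List Char)) (i : Nat) :
    cycP motifs (i + 1) = cycP motifs i + (motifs.getD (i % motifs.length) []).length := by
  simp [cycP, List.range_succ]

theorem sumS_succ (motifs : List (List Char)) (r : Nat) (h : r < motifs.length) :
    sumS motifs (r + 1) = sumS motifs r + (motifs.getD r []).length := by
  have ht : motifs.take (r+1) = motifs.take r ++ [motifs[r]] := by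
    rw [List.take_add_one, List.getElem?_eq_getElem h]; rfl
  rw [sumS, sumS, ht, List.map_append, List.sum_append,
    List.getD_eq_getElem?_getD, List.getElem?_eq_getElem h]
  simp

theorem sumS_len (motifs : List (List Char)) : sumS motifs motifs.length = motifs.flatten.length := by
  simp [sumS, List.length_flatten, List.take_of_length_le (le_refl _)]

theorem len_le_sum (l : List (List Char)) (h : ∀ m ∈ l, m ≠ []) :
    l.length ≤ (l.map List.length).sum := by
  induction l with
  | nil => simp
  | cons a t ih =>
    have h1 : 1 ≤ a.length := List.length_pos_of_ne_nil (h a (by simp))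
    have h2 := ih (fun m hm => h m (List.mem_cons_of_mem _ hm))
    simp only [List.length_cons, List.map_cons, List.sum_cons]
    omega

theorem sumS_lt (motifs : List (List Char)) (hne : ∀ m ∈ motifs, m ≠ []) (r : Nat)
    (h : r < motifs.length) : sumS motifs (r + 1) + (motifs.length - (r + 1)) ≤ motifs.flatten.length := by
  have hlen : (motifs.drop (r+1)).length ≤ ((motifs.drop (r+1)).map List.length).sum :=
    len_le_sum _ (fun m hm => hne m (List.mem_of_mem_drop hm))
  have hsplit : motifs.flatten.length = sumS motifs (r+1) + ((motifs.drop (r+1)).map List.length).sum := by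
    conv_lhs => rw [← List.take_append_drop (r+1) motifs]
    simp [sumS, List.length_flatten]
  have hdlen : (motifs.drop (r+1)).length = motifs.length - (r+1) := List.length_drop ..
  omega

theorem cycP_mod (motifs : List (List Char)) (hN : motifs ≠ []) (hne : ∀ m ∈ motifs, m ≠ [])
    (i : Nat) : cycP motifs i % motifs.flatten.length = sumS motifs (i % motifs.length) := by
  have hNpos : 0 < motifs.length := List.length_pos_of_ne_nil hN
  induction i with
  | zero => simp [cycP, sumS]
  | succ i ih =>
    have hr : i % motifs.length < motifs.length := Nat.mod_lt _ hNpos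
    have hmod : (i + 1) % motifs.length = (i % motifs.length + 1) % motifs.length :=
      (Nat.mod_add_mod i motifs.length 1).symm
    rw [cycP_succ, ← Nat.mod_add_mod, ih, ← sumS_succ motifs _ hr, hmod]
    by_cases hc : i % motifs.length + 1 = motifs.length
    · rw [hc, Nat.mod_self, sumS_len, Nat.mod_self, sumS]
      simp
    · have hlt : i % motifs.length + 1 < motifs.length := by omega
      have hS := sumS_lt motifs hne _ hr
      rw [Nat.mod_eq_of_lt hlt, Nat.mod_eq_of_lt (by omega)]

theorem flatten_getD (motifs : List (List Char)) (r : Nat) (hr : r < motifs.length) (j : Nat)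
    (hj : j < (motifs.getD r []).length) :
    motifs.flatten.getD (sumS motifs r + j) ' ' = (motifs.getD r []).getD j ' ' := by
  induction motifs generalizing r with
  | nil => simp at hr
  | cons m t ih =>
    cases r with
    | zero =>
      have hj' : j < m.length := by simpa using hj
      simp only [List.flatten_cons, sumS, List.take_zero, List.map_nil, List.sum_nil, Nat.zero_add]
      rw [List.getD_append _ _ _ _ hj']
      simp
    | succ r =>
      have hr' : r < t.length := by simpa using hr
      have hs : sumS (m :: t) (r + 1) = m.length + sumS t r := by
        simp [sumS]
      rw [hs, Nat.add_assoc, List.flatten_cons, List.getD_append_right _ _ _ _ (by omega)]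
      simp only [Nat.add_sub_cancel_left]
      have hj' : j < (t.getD r []).length := by simpa using hj
      simpa using ih r hr' hj'

-- the stream segment starting at cycP i is motif i % N
theorem stream_segment (motifs : List (List Char)) (hN : motifs ≠ []) (hne : ∀ m ∈ motifs, m ≠ [])
    (i j : Nat) (hj : j < (motifs.getD (i % motifs.length) []).length) :
    streamD motifs.flatten (cycP motifs i + j)
      = pvDigit ((motifs.getD (i % motifs.length) []).getD j ' ') := by
  have hNpos : 0 < motifs.length := List.length_pos_of_ne_nil hN
  have hr : i % motifs.length < motifs.length := Nat.mod_lt _ hNpos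
  have hS := sumS_lt motifs hne _ hr
  have hSsucc := sumS_succ motifs _ hr
  have hmod : (cycP motifs i + j) % motifs.flatten.length = sumS motifs (i % motifs.length) + j := by
    rw [← Nat.mod_add_mod, cycP_mod motifs hN hne i]
    exact Nat.mod_eq_of_lt (by omega)
  rw [streamD, hmod, flatten_getD motifs _ hr j hj]

theorem innerA_eq (chars : List Char) (span : Int) (values : List Int)
    (h : (values.length : Int) < span) :
    pvInnerA chars span values
      = values ++ (chars.take ((span - values.length).toNat)).map pvDigit := by
  induction chars generalizing values with
  | nil => simp [pvInnerA]
  | cons c cs ih =>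
    rw [pvInnerA]
    simp only [List.length_append, List.length_cons, List.length_nil]
    by_cases hif : span ≤ ((values.length + 1 : Nat) : Int)
    · rw [if_pos (by exact_mod_cast hif)]
      have h1 : (span - (values.length : Int)).toNat = 1 := by omega
      rw [h1]
      simp
    · rw [if_neg (by exact_mod_cast hif)]
      rw [ih (values ++ [pvDigit c])
        (by simp only [List.length_append, List.length_cons, List.length_nil]; push_cast; omega)]
      have h2 : (span - (values.length : Int)).toNat
          = (span - ((values ++ [pvDigit c]).length : Int)).toNat + 1 := by
        simp only [List.length_append, List.length_cons, List.length_nil]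
        push_cast
        omega
      rw [h2, List.take_succ_cons]
      simp

theorem seg_append (motifs : List (List Char)) (hN : motifs ≠ []) (hne : ∀ m ∈ motifs, m ≠ [])
    (i u : Nat) (hu : u ≤ (motifs.getD (i % motifs.length) []).length) (values : List Int)
    (hv : values = cycTake motifs.flatten values.length) (hP : values.length = cycP motifs i) :
    values ++ ((motifs.getD (i % motifs.length) []).take u).map pvDigit
      = cycTake motifs.flatten (values.length + u) := by
  apply List.ext_getElem
  · have hu' : u ≤ (motifs[i % motifs.length]?.getD []).length := by
      simpa [List.getD] using hu
    simp [length_cycTake, List.length_take]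
    omega
  · intro idx h1 h2
    rw [getElem_cycTake _ _ idx (by simpa [length_cycTake] using h2)]
    by_cases hidx : idx < values.length
    · rw [List.getElem_append_left hidx, List.getElem_of_eq hv,
        getElem_cycTake _ _ idx hidx]
    · have hlen : ((motifs.getD (i % motifs.length) []).take u).length = u :=
        List.length_take_of_le hu
      have hidx2 : idx - values.length < u := by
        simp [List.length_take] at h1
        omega
      rw [List.getElem_append_right (by omega)]
      rw [List.getElem_map]
      have hjm : idx - values.length < (motifs.getD (i % motifs.length) []).length := by omega
      have := stream_segment motifs hN hne i (idx - values.length) (by omega)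
      have hidxeq : idx = cycP motifs i + (idx - values.length) := by omega
      conv_rhs => rw [hidxeq]
      rw [this, List.getD_eq_getElem _ _ hjm]
      simp [List.getElem_take]

theorem loopA_eq (motifs : List (List Char)) (hN : motifs ≠ []) (hne : ∀ m ∈ motifs, m ≠ [])
    (span : Int) (i : Nat) (values : List Int)
    (hv : values = cycTake motifs.flatten values.length) (hP : values.length = cycP motifs i) :
    pvLoopA motifs span values i
      = if (values.length : Int) < span then cycTake motifs.flatten span.toNat else values := by
  have hNpos : 0 < motifs.length := List.length_pos_of_ne_nil hN
  induction hk : (span - (values.length : Int)).toNat using Nat.strong_induction_on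
      generalizing i values with
  | _ k IH =>
  rw [pvLoopA]
  by_cases h : (values.length : Int) < span
  · rw [dif_pos h, if_pos h]
    have hr : i % motifs.length < motifs.length := Nat.mod_lt _ hNpos
    have hmem : motifs.getD (i % motifs.length) [] ∈ motifs := by
      rw [List.getD_eq_getElem _ _ hr]; exact List.getElem_mem _
    have hmlen : 1 ≤ (motifs.getD (i % motifs.length) []).length :=
      List.length_pos_of_ne_nil (hne _ hmem)
    have ht : 1 ≤ (span - (values.length : Int)).toNat := by omega
    rw [innerA_eq _ span values h]
    have hvlen : (values ++
        ((motifs.getD (i % motifs.length) []).take ((span - (values.length : Int)).toNat)).map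
          pvDigit).length
        = values.length + min ((span - (values.length : Int)).toNat)
            (motifs.getD (i % motifs.length) []).length := by
      simp [List.length_take]
    rw [dif_pos (by rw [hvlen]; omega)]
    by_cases hcase :
        (span - (values.length : Int)).toNat ≤ (motifs.getD (i % motifs.length) []).length
    · -- the break fires inside this motif: the loop exits with exactly span digits
      rw [pvLoopA]
      rw [dif_neg (by rw [hvlen]; push_cast; omega)]
      rw [seg_append motifs hN hne i _ hcase values hv hP]
      congr 1
      omega
    · -- the whole motif is consumed; continue with the next motif_index
      push Not at hcase
      have htake : (motifs.getD (i % motifs.length) []).take ((span - (values.length : Int)).toNat)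
          = motifs.getD (i % motifs.length) [] := List.take_of_length_le (by omega)
      rw [htake]
      have hfull := seg_append motifs hN hne i (motifs.getD (i % motifs.length) []).length
        (le_refl _) values hv hP
      rw [List.take_length] at hfull
      have hv' : values ++ (motifs.getD (i % motifs.length) []).map pvDigit
          = cycTake motifs.flatten
              (values ++ (motifs.getD (i % motifs.length) []).map pvDigit).length := by
        have hL : (values ++ (motifs.getD (i % motifs.length) []).map pvDigit).length
            = values.length + (motifs.getD (i % motifs.length) []).length := by
          simp only [List.length_append, List.length_map]
        rw [hL, hfull]
      have hP' : (values ++ (motifs.getD (i % motifs.length) []).map pvDigit).length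
          = cycP motifs (i + 1) := by
        simp [cycP_succ, hP]
      rw [IH ((span -
            (((values ++ (motifs.getD (i % motifs.length) []).map pvDigit).length : Nat) : Int)).toNat)
          (by simp only [List.length_append, List.length_map]; push_cast; omega)
          (i + 1) _ hv' hP' rfl]
      rw [if_pos (by simp only [List.length_append, List.length_map]; push_cast; omega)]
  · rw [dif_neg h, if_neg h]

-- ===== VERDICT (by name: the statement is the Claim_ definition above) =====
theorem join_nil_eq_flatten (l : List (List Char)) : PySem.Chars.join [] l = l.flatten := by
  induction l with
  | nil => rfl
  | cons a t ih =>
    cases t with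
    | nil => simp [PySem.Chars.join, List.intercalate]
    | cons b u => rw [PySem.Chars.join_cons_cons]; simp_all

theorem expand_program_phase_spec : Claim_equal_expand_program_phase := by
  intro phase_text phase_span _
  unfold Spec_expand_program_phase expand_program_phase expand_program_phase_alt
  by_cases hM : (pvMotifs phase_text).isEmpty
  · simp [hM]
  · simp only [hM, Bool.false_eq_true, if_false]
    have hN : pvMotifs phase_text ≠ [] := by
      intro h; rw [h] at hM; simp at hM
    have hne : ∀ m ∈ pvMotifs phase_text, m ≠ [] := by
      intro m hm
      have := List.of_mem_filter (p := fun (m : List Char) => !m.isEmpty) hm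
      simpa using this
    rw [loopA_eq _ hN hne phase_span 0 [] (by simp [cycTake]) (by simp [cycP]),
      join_nil_eq_flatten]
    by_cases hs : 0 < phase_span
    · rw [if_pos (by simpa using hs), PySem.List.pyRange_one]
      simp only [List.map_map]
      rw [cycTake, Int.sub_zero]
      apply List.map_congr_left
      intro k _
      simp only [Function.comp_apply, Int.zero_add]
      rw [streamD, PySem.Int.mod_natCast, PySem.List.pyGetD_natCast]
    · rw [if_neg (by simpa using hs), PySem.List.pyRange_one_eq_nil (by omega)]
      simp
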